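-- pv_equiv track=rewrite | github.com/miliar/Code_Jam_Webscraper | solutions_python/solutions_year16_round4_nr1/159.py | try_winner
-- ===== SOURCE A (Python) =====
-- ROCK = 'R'
--
-- PAPER = 'P'
--
-- SCISSORS = 'S'
--
-- def try_winner(winner, N, R, P, S):
--     l = [winner]
--     for _round in range(N):
--         l2 = []
--         for i in l:
--             if i == ROCK:
--                 l2.extend([ROCK, SCISSORS])
--             elif i == PAPER:
--                 l2.extend([PAPER, ROCK])
--             else:
--                 assert i == SCISSORS
--                 l2.extend([SCISSORS, PAPER])
--         l = l2
--     if l.count(ROCK) == R and l.count(PAPER) == P and l.count(SCISSORS) == S: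
--         return l
--     return None
-- ===== SOURCE B (Python) =====
-- ROCK = 'R'
-- PAPER = 'P'
-- SCISSORS = 'S'
--
-- # The bracket tree sends a parent w to children (w, NXT[w]) where NXT is the
-- # 3-cycle R->S->P->R, so the leaf at index i is winner shifted popcount(i) mod 3
-- # times along the cycle: build the list directly by index.
-- NXT = {ROCK: SCISSORS, SCISSORS: PAPER, PAPER: ROCK}
--
-- def try_winner(winner, N, R, P, S):
--     n = max(N, 0)
--     l = []
--     for i in range(1 << n):
--         c = winner
--         for _ in range(bin(i).count('1') % 3):
--             c = NXT[c]
--         l.append(c)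
--     if l.count(ROCK) == R and l.count(PAPER) == P and l.count(SCISSORS) == S:
--         return l
--     return None
-- ===== Notes on version B (the rewrite author's own statement) =====
-- stated objective: alternative
-- what changed: Replaces A's round-by-round doubling of the whole bracket list with a direct per-index construction: the child map is the 3-cycle R->S->P->R, so leaf i of the final bracket is the winner shifted popcount(i) mod 3 along the cycle; the count check is unchanged.
-- outside the precondition, e.g. on try_winner('X', 1, 0, 0, 0): A raises AssertionError, B raises KeyError
import Mathlib
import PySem

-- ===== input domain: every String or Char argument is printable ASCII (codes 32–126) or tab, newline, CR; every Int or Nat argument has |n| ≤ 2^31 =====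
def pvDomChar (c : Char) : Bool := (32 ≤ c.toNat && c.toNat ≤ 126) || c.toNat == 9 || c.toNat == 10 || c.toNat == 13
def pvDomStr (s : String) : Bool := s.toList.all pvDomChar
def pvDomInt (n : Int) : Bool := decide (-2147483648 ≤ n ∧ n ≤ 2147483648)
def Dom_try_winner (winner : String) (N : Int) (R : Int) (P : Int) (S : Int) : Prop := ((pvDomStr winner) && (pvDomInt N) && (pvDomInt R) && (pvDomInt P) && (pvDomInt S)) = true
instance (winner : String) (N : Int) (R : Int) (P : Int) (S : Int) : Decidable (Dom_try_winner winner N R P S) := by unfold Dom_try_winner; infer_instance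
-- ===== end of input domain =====

-- B builds the bracket directly by leaf index (leaf i = winner shifted popcount(i) mod 3 along the cycle R→S→P→R) instead of A's round-by-round doubling; objective: alternative.

-- ===== PORT A =====
-- one round: for i in l: extend l2 by the two children of i.
-- The 'assert i == SCISSORS' failure (invalid winner, only reachable when N ≥ 1) raises
-- in Python and is excluded by Pre_try_winner; on such excluded inputs the port takes the else branch.
def pvStepA (l : List String) : List String :=
  l.foldl (fun l2 i =>
    if i == "R" then l2 ++ ["R", "S"]
    else if i == "P" then l2 ++ ["P", "R"]
    else l2 ++ ["S", "P"]) []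

def pvLoopA : Nat → List String → List String
  | 0, l => l
  | n + 1, l => pvLoopA n (pvStepA l)

def try_winner (winner : String) (N : Int) (R : Int) (P : Int) (S : Int) : Option (List String) :=
  let l := pvLoopA N.toNat [winner]
  if (PySem.List.count l "R" : Int) = R ∧ (PySem.List.count l "P" : Int) = P ∧ (PySem.List.count l "S" : Int) = S then
    some l
  else
    none

-- ===== PORT B =====
-- NXT = {'R':'S','S':'P','P':'R'}; a KeyError on an invalid key (invalid winner with a
-- lookup actually performed, i.e. N ≥ 1) raises in Python and is excluded by Pre_try_winner;
-- the port's final else returns "R" on such excluded inputs.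
def pvNxt (c : String) : String :=
  if c == "R" then "S" else if c == "S" then "P" else "R"

-- bin(i).count('1'): number of 1 bits of i
def pvPopcount (n : Nat) : Nat :=
  if n = 0 then 0 else pvPopcount (n / 2) + n % 2
decreasing_by omega

-- inner loop: for _ in range(k): c = NXT[c]
def pvIter (w : String) : Nat → String
  | 0 => w
  | k + 1 => pvNxt (pvIter w k)

-- leaf at index i
def pvElem (w : String) (i : Nat) : String := pvIter w (pvPopcount i % 3)

def try_winner_alt (winner : String) (N : Int) (R : Int) (P : Int) (S : Int) : Option (List String) :=
  let n := (max N 0).toNat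
  let l := (List.range (2 ^ n)).map (pvElem winner)
  if (PySem.List.count l "R" : Int) = R ∧ (PySem.List.count l "P" : Int) = P ∧ (PySem.List.count l "S" : Int) = S then
    some l
  else
    none

-- ===== PRECONDITION & SPEC =====
-- Pre_ excludes exactly the inputs on which Python A raises AssertionError (and B KeyError):
-- an invalid winner (not 'R'/'P'/'S') together with at least one round (N ≥ 1).
def Pre_try_winner (winner : String) (N : Int) (R : Int) (P : Int) (S : Int) : Prop :=
  winner = "R" ∨ winner = "P" ∨ winner = "S" ∨ N ≤ 0
instance (winner : String) (N : Int) (R : Int) (P : Int) (S : Int) : Decidable (Pre_try_winner winner N R P S) := by unfold Pre_try_winner; infer_instance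

def pvWitness_try_winner : String × Int × Int × Int × Int := ("R", 2, 1, 1, 2)

def Spec_try_winner (winner : String) (N : Int) (R : Int) (P : Int) (S : Int) (out : Option (List String)) : Prop := out = try_winner_alt winner N R P S
instance (winner : String) (N : Int) (R : Int) (P : Int) (S : Int) (out : Option (List String)) : Decidable (Spec_try_winner winner N R P S out) := by unfold Spec_try_winner; infer_instance

-- ===== CLAIM (what is proved, stated in full; the proofs are below) =====
def Claim_equal_try_winner : Prop := ∀ (winner : String) (N : Int) (R : Int) (P : Int) (S : Int), Dom_try_winner winner N R P S → Pre_try_winner winner N R P S → Spec_try_winner winner N R P S (try_winner winner N R P S)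

-- ===== LEMMAS AND PROOFS =====

def pvExpand (i : String) : List String :=
  if i == "R" then ["R", "S"] else if i == "P" then ["P", "R"] else ["S", "P"]

theorem pvStepA_acc (l : List String) (acc : List String) :
    l.foldl (fun l2 i =>
      if i == "R" then l2 ++ ["R", "S"]
      else if i == "P" then l2 ++ ["P", "R"]
      else l2 ++ ["S", "P"]) acc = acc ++ l.flatMap pvExpand := by
  induction l generalizing acc with
  | nil => simp
  | cons x xs ih =>
    simp only [List.foldl_cons, List.flatMap_cons, ih, pvExpand]
    split_ifs <;> simp

theorem pvStepA_eq (l : List String) : pvStepA l = l.flatMap pvExpand := by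
  rw [pvStepA, pvStepA_acc]; simp

theorem pvLoopA_append (n : Nat) (a b : List String) :
    pvLoopA n (a ++ b) = pvLoopA n a ++ pvLoopA n b := by
  induction n generalizing a b with
  | zero => rfl
  | succ n ih =>
    simp only [pvLoopA, pvStepA_eq, List.flatMap_append, ih]

theorem pvPopcount_zero : pvPopcount 0 = 0 := by rw [pvPopcount]; rfl

theorem pvPopcount_step (n : Nat) : pvPopcount n = pvPopcount (n / 2) + n % 2 := by
  rw [pvPopcount]
  split_ifs with h
  · subst h; rw [pvPopcount_zero]
  · rfl

theorem pvPopcount_pow_add (n : Nat) : ∀ i : Nat, i < 2 ^ n →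
    pvPopcount (2 ^ n + i) = pvPopcount i + 1 := by
  induction n with
  | zero =>
    intro i hi
    have : i = 0 := by omega
    subst this
    show pvPopcount 1 = pvPopcount 0 + 1
    rw [pvPopcount_step 1, pvPopcount_zero]
  | succ n ih =>
    intro i hi
    have hk : 2 ^ (n + 1) = 2 * 2 ^ n := by rw [pow_succ]; ring
    rw [pvPopcount_step (2 ^ (n + 1) + i), pvPopcount_step i]
    have h1 : (2 ^ (n + 1) + i) / 2 = 2 ^ n + i / 2 := by omega
    have h2 : (2 ^ (n + 1) + i) % 2 = i % 2 := by omega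
    rw [h1, h2, ih (i / 2) (by omega)]
    omega

theorem pvIter_nxt (w : String) (k : Nat) : pvIter (pvNxt w) k = pvNxt (pvIter w k) := by
  induction k with
  | zero => rfl
  | succ k ih => simp only [pvIter, ih]

def pvValid (w : String) : Prop := w = "R" ∨ w = "P" ∨ w = "S"

theorem pvIter_three (w : String) (hw : pvValid w) : pvIter w 3 = pvIter w 0 := by
  rcases hw with rfl | rfl | rfl <;> decide

theorem pvIter_succ_mod (w : String) (hw : pvValid w) (k : Nat) :
    pvIter w ((k + 1) % 3) = pvNxt (pvIter w (k % 3)) := by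
  have : pvNxt (pvIter w (k % 3)) = pvIter w (k % 3 + 1) := rfl
  rw [this]
  have h3 : k % 3 = 0 ∨ k % 3 = 1 ∨ k % 3 = 2 := by omega
  rcases h3 with h | h | h
  · rw [show (k + 1) % 3 = 1 by omega, h]
  · rw [show (k + 1) % 3 = 2 by omega, h]
  · rw [show (k + 1) % 3 = 0 by omega, h]
    exact (pvIter_three w hw).symm

theorem pvElem_shift (w : String) (hw : pvValid w) (n i : Nat) (hi : i < 2 ^ n) :
    pvElem w (2 ^ n + i) = pvElem (pvNxt w) i := by
  unfold pvElem
  rw [pvPopcount_pow_add n i hi, pvIter_nxt, pvIter_succ_mod w hw]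

theorem pvNxt_valid (w : String) (hw : pvValid w) : pvValid (pvNxt w) := by
  rcases hw with rfl | rfl | rfl <;> simp [pvNxt, pvValid]

theorem pvStepA_single (w : String) (hw : pvValid w) : pvStepA [w] = [w, pvNxt w] := by
  rcases hw with rfl | rfl | rfl <;> rfl

theorem pvLoopA_eq_map (n : Nat) : ∀ w : String, pvValid w →
    pvLoopA n [w] = (List.range (2 ^ n)).map (pvElem w) := by
  induction n with
  | zero =>
    intro w _
    show [w] = [pvElem w 0]
    simp only [pvElem, pvPopcount_zero]
    rfl
  | succ n ih =>
    intro w hw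
    have : pvLoopA (n + 1) [w] = pvLoopA n (pvStepA [w]) := rfl
    rw [this, pvStepA_single w hw,
      show ([w, pvNxt w] : List String) = [w] ++ [pvNxt w] from rfl,
      pvLoopA_append, ih w hw, ih (pvNxt w) (pvNxt_valid w hw),
      show 2 ^ (n + 1) = 2 ^ n + 2 ^ n by rw [pow_succ]; ring,
      List.range_add, List.map_append, List.map_map]
    congr 1
    apply List.map_congr_left
    intro i hi
    have hi' : i < 2 ^ n := List.mem_range.mp hi
    exact (pvElem_shift w hw n i hi').symm

-- ===== VERDICT (by name: the statement is the Claim_ definition above) =====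
theorem try_winner_spec : Claim_equal_try_winner := by
  intro winner N R P S _ hpre
  unfold Spec_try_winner try_winner try_winner_alt
  suffices h : pvLoopA N.toNat [winner] = (List.range (2 ^ (max N 0).toNat)).map (pvElem winner) by
    rw [h]
  by_cases hv : pvValid winner
  · rw [show N.toNat = (max N 0).toNat by omega, pvLoopA_eq_map _ _ hv]
  · have hN : N ≤ 0 := by
      rcases hpre with h | h | h | h
      · exact absurd (Or.inl h) hv
      · exact absurd (Or.inr (Or.inl h)) hv
      · exact absurd (Or.inr (Or.inr h)) hv
      · exact h
    rw [show N.toNat = 0 by omega, show (max N 0).toNat = 0 by omega]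
    show [winner] = [pvElem winner 0]
    simp only [pvElem, pvPopcount_zero]
    rfl
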